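-- pv_equiv track=rewrite | github.com/Gookuruto/Algorithm_Analize | kMin.py | generate_many_M
-- ===== SOURCE A (Python) =====
-- def generate_M(n, shift):
--     x = [None] * n
--     for i in range(n):
--         x[i] = i + shift
--     return x
--
-- def generate_many_M(how_many):
--     x = []
--     for i in range(how_many):
--         if i == 0:
--             x.append(generate_M(i + 1, 1))
--         else:
--             x.append(generate_M(i + 1, x[-1][-1] + 1))
--     return x
-- ===== SOURCE B (Python) =====
-- def generate_many_M(how_many):
--     blocks = []
--     for i in range(how_many):
--         start = 1 + i * (i + 1) // 2
--         blocks.append(list(range(start, start + i + 1)))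
--     return blocks
-- ===== Notes on version B (the rewrite author's own statement) =====
-- stated objective: simpler
-- what changed: Each block's starting value is computed independently by the closed-form triangular-number formula 1 + i*(i+1)//2 instead of carrying the last element of the previously built block, removing the generate_M helper and the x[-1][-1] data dependency.
import Mathlib
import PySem

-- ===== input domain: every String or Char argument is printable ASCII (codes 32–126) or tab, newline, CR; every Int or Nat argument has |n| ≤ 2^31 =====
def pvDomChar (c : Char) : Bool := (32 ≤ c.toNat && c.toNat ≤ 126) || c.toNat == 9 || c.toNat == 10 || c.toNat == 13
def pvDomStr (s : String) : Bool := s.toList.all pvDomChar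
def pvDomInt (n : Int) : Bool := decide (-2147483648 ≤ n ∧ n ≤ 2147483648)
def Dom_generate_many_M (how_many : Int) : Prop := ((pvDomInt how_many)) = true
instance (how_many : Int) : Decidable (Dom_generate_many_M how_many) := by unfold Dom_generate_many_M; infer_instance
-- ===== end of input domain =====

-- B computes each block's start by the closed-form triangular formula 1 + i*(i+1)//2
-- instead of A's carry of the previous block's last element (simpler decomposition).

-- ===== PORT A =====
def generate_M (n : Int) (shift : Int) : List Int :=
  (PySem.List.pyRange 0 n 1).map (fun i => i + shift)

def generate_many_M (how_many : Int) : List (List Int) :=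
  (PySem.List.pyRange 0 how_many 1).foldl
    (fun x i =>
      if i == 0 then x ++ [generate_M (i + 1) 1]
      else
        x ++ [generate_M (i + 1)
          (((PySem.List.pyGet? ((PySem.List.pyGet? x (-1)).getD []) (-1)).getD 0) + 1)])
    []

-- ===== PORT B =====
def generate_many_M_alt (how_many : Int) : List (List Int) :=
  (PySem.List.pyRange 0 how_many 1).map (fun i =>
    let start := 1 + PySem.Int.floordiv (i * (i + 1)) 2
    PySem.List.pyRange start (start + i + 1) 1)

-- ===== PRECONDITION & SPEC =====
def Spec_generate_many_M (how_many : Int) (out : List (List Int)) : Prop := out = generate_many_M_alt how_many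
instance (how_many : Int) (out : List (List Int)) : Decidable (Spec_generate_many_M how_many out) := by unfold Spec_generate_many_M; infer_instance

-- ===== CLAIM (what is proved, stated in full; the proofs are below) =====
def Claim_equal_generate_many_M : Prop := ∀ (how_many : Int), Dom_generate_many_M how_many → Spec_generate_many_M how_many (generate_many_M how_many)

-- ===== LEMMAS AND PROOFS =====

theorem generate_M_eq (n s : Int) :
    generate_M n s = PySem.List.pyRange s (s + n) 1 := by
  unfold generate_M
  rw [PySem.List.pyRange_one 0 n, PySem.List.pyRange_one s (s + n)]
  have : s + n - s = n - 0 := by ring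
  rw [this, List.map_map]
  exact List.map_congr_left (fun k _ => by simp [Function.comp]; ring)

theorem tri_step (k : Nat) :
    PySem.Int.floordiv ((k : Int) * ((k : Int) + 1)) 2 + ((k : Int) + 1)
      = PySem.Int.floordiv (((k : Int) + 1) * ((k : Int) + 2)) 2 := by
  obtain ⟨c, hc⟩ := Int.even_mul_succ_self (k : Int)
  have h1 : (k : Int) * ((k : Int) + 1) = 2 * c := by omega
  have h2 : ((k : Int) + 1) * ((k : Int) + 2) = 2 * (c + (k : Int) + 1) := by
    nlinarith [h1]
  rw [h1, h2, PySem.Int.floordiv_eq_ediv_of_pos (by norm_num),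
      PySem.Int.floordiv_eq_ediv_of_pos (by norm_num),
      Int.mul_ediv_cancel_left _ (by norm_num : (2:Int) ≠ 0),
      Int.mul_ediv_cancel_left _ (by norm_num : (2:Int) ≠ 0)]
  ring

theorem alt_succ (m : Nat) :
    generate_many_M_alt ((m : Int) + 1)
      = generate_many_M_alt (m : Int)
        ++ [let s := 1 + PySem.Int.floordiv ((m : Int) * ((m : Int) + 1)) 2
            PySem.List.pyRange s (s + (m : Int) + 1) 1] := by
  unfold generate_many_M_alt
  rw [PySem.List.pyRange_one_succ_right (by exact_mod_cast Nat.zero_le m), List.map_append]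
  simp

theorem main_nat (m : Nat) :
    generate_many_M (m : Int) = generate_many_M_alt (m : Int) := by
  induction m with
  | zero => decide
  | succ k ih =>
    have hstep : ((k : Int) + 1 : Int) = ((k + 1 : Nat) : Int) := by push_cast; ring
    rw [← hstep, alt_succ k]
    unfold generate_many_M
    rw [PySem.List.pyRange_one_succ_right (by exact_mod_cast Nat.zero_le k),
        List.foldl_append]
    have hpref : (PySem.List.pyRange 0 (k : Int) 1).foldl
        (fun x i =>
          if i == 0 then x ++ [generate_M (i + 1) 1]
          else
            x ++ [generate_M (i + 1)
              (((PySem.List.pyGet? ((PySem.List.pyGet? x (-1)).getD []) (-1)).getD 0) + 1)])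
        [] = generate_many_M_alt (k : Int) := by
      rw [show (PySem.List.pyRange 0 (k : Int) 1).foldl _ [] = generate_many_M (k : Int) from rfl, ih]
    rw [hpref]
    simp only [List.foldl]
    cases k with
    | zero => decide
    | succ j =>
      have hne : (((j + 1 : Nat) : Int) == 0) = false := by
        rw [beq_eq_false_iff_ne]
        push_cast
        omega
      rw [hne]
      simp only [Bool.false_eq_true, if_false]
      -- identify the last block of the accumulator
      have hj : ((j : Int) + 1 : Int) = ((j + 1 : Nat) : Int) := by push_cast; ring
      rw [← hj, alt_succ j]
      set s := 1 + PySem.Int.floordiv ((j : Int) * ((j : Int) + 1)) 2 with hs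
      rw [PySem.List.pyGet?_neg_one_append_singleton]
      simp only [Option.getD_some]
      have hlast : PySem.List.pyGet? (PySem.List.pyRange s (s + (j : Int) + 1) 1) (-1)
          = some (s + (j : Int)) := by
        have : PySem.List.pyRange s (s + (j : Int) + 1) 1
            = PySem.List.pyRange s (s + (j : Int)) 1 ++ [s + (j : Int)] := by
          exact PySem.List.pyRange_one_succ_right (by omega)
        rw [this, PySem.List.pyGet?_neg_one_append_singleton]
      rw [hlast]
      simp only [Option.getD_some]
      congr 1
      rw [generate_M_eq]
      have htri := tri_step j
      have h2 : ((j : Int) + 1 + 1) = (j : Int) + 2 := by ring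
      have hstart : s + (j : Int) + 1
          = 1 + PySem.Int.floordiv (((j : Int) + 1) * ((j : Int) + 1 + 1)) 2 := by
        rw [h2, hs]; omega
      rw [hstart]
      congr 1

-- ===== VERDICT (by name: the statement is the Claim_ definition above) =====
theorem generate_many_M_spec : Claim_equal_generate_many_M := by
  intro h _
  unfold Spec_generate_many_M
  by_cases hn : 0 ≤ h
  · have : h = ((h.toNat : Nat) : Int) := by omega
    rw [this]; exact main_nat h.toNat
  · unfold generate_many_M generate_many_M_alt
    rw [PySem.List.pyRange_one_eq_nil (by omega)]
    simp
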